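-- pv_equiv track=rewrite | github.com/RamonSchneroke-88/Loto-IA | lotofacil_v92_app.py | score_hibrido
-- ===== SOURCE A (Python) =====
-- def score_hibrido(jogo):
--     pares = sum(1 for d in jogo if d % 2 == 0)
--     moldura = sum(1 for d in jogo if d in [1,2,3,4,5,6,10,15,20,21,22,23,24,25])
--     primos = sum(1 for d in jogo if d in [2,3,5,7,11,13,17,19,23])
--     soma = sum(jogo)
--     criterios = [
--         5 <= pares <= 10,
--         8 <= moldura <= 12,
--         3 <= primos <= 7,
--         180 <= soma <= 250
--     ]
--     return sum(criterios), {"pares": pares, "moldura": moldura, "primos": primos, "soma": soma}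
-- ===== SOURCE B (Python) =====
-- def score_hibrido(jogo):
--     MOLDURA = {1, 2, 3, 4, 5, 6, 10, 15, 20, 21, 22, 23, 24, 25}
--     PRIMOS = {2, 3, 5, 7, 11, 13, 17, 19, 23}
--     pares = moldura = primos = soma = 0
--     for d in jogo:
--         soma += d
--         if d % 2 == 0:
--             pares += 1
--         if d in MOLDURA:
--             moldura += 1
--         if d in PRIMOS:
--             primos += 1
--     criterios = [
--         5 <= pares <= 10,
--         8 <= moldura <= 12,
--         3 <= primos <= 7,
--         180 <= soma <= 250
--     ]
--     return sum(criterios), {"pares": pares, "moldura": moldura, "primos": primos, "soma": soma}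
-- ===== Notes on version B (the rewrite author's own statement) =====
-- stated objective: alternative
-- what changed: Replaces A's four separate passes over jogo (three generator-expression counts with O(k) list membership and a sum) with a single loop maintaining four accumulators and O(1) set membership.
import Mathlib
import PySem

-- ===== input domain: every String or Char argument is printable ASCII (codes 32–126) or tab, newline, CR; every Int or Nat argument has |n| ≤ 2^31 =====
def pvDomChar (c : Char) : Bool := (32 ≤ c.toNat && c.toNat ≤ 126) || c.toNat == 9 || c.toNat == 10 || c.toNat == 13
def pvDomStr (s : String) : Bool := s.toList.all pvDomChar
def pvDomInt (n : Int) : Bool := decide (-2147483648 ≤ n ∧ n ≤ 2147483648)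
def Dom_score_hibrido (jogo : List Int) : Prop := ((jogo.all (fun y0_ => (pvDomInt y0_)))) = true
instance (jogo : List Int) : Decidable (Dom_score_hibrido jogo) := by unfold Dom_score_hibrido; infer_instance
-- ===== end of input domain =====

-- B fuses A's four separate passes over jogo into one loop with four accumulators; same thresholds and output.

-- ===== PORT A =====
-- four separate passes: three 0/1-counting generator sums and sum(jogo), as in A
def score_hibrido (jogo : List Int) : Int × (List (String × Int)) :=
  let pares : Int := jogo.foldl (fun acc d => acc + (if PySem.Int.mod d 2 = 0 then 1 else 0)) 0
  let moldura : Int := jogo.foldl (fun acc d =>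
    acc + (if ([1,2,3,4,5,6,10,15,20,21,22,23,24,25] : List Int).contains d then 1 else 0)) 0
  let primos : Int := jogo.foldl (fun acc d =>
    acc + (if ([2,3,5,7,11,13,17,19,23] : List Int).contains d then 1 else 0)) 0
  let soma : Int := jogo.foldl (fun acc d => acc + d) 0
  let criterios : List Bool :=
    [decide (5 ≤ pares ∧ pares ≤ 10),
     decide (8 ≤ moldura ∧ moldura ≤ 12),
     decide (3 ≤ primos ∧ primos ≤ 7),
     decide (180 ≤ soma ∧ soma ≤ 250)]
  (criterios.foldl (fun a b => a + (if b then 1 else 0)) 0,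
   [("pares", pares), ("moldura", moldura), ("primos", primos), ("soma", soma)])

-- ===== PORT B =====
-- single pass maintaining (pares, moldura, primos, soma); membership against Python sets
def score_hibrido_alt (jogo : List Int) : Int × (List (String × Int)) :=
  let MOLDURA : PySem.Set Int := PySem.Set.ofList [1,2,3,4,5,6,10,15,20,21,22,23,24,25]
  let PRIMOS : PySem.Set Int := PySem.Set.ofList [2,3,5,7,11,13,17,19,23]
  let st := jogo.foldl (fun (st : Int × Int × Int × Int) d =>
    let (pares, moldura, primos, soma) := st
    let soma := soma + d
    let pares := if PySem.Int.mod d 2 = 0 then pares + 1 else pares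
    let moldura := if PySem.Set.contains MOLDURA d then moldura + 1 else moldura
    let primos := if PySem.Set.contains PRIMOS d then primos + 1 else primos
    (pares, moldura, primos, soma)) (0, 0, 0, 0)
  let (pares, moldura, primos, soma) := st
  let criterios : List Bool :=
    [decide (5 ≤ pares ∧ pares ≤ 10),
     decide (8 ≤ moldura ∧ moldura ≤ 12),
     decide (3 ≤ primos ∧ primos ≤ 7),
     decide (180 ≤ soma ∧ soma ≤ 250)]
  (criterios.foldl (fun a b => a + (if b then 1 else 0)) 0,
   [("pares", pares), ("moldura", moldura), ("primos", primos), ("soma", soma)])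

-- ===== PRECONDITION & SPEC =====
def Spec_score_hibrido (jogo : List Int) (out : Int × (List (String × Int))) : Prop := out = score_hibrido_alt jogo
instance (jogo : List Int) (out : Int × (List (String × Int))) : Decidable (Spec_score_hibrido jogo out) := by unfold Spec_score_hibrido; infer_instance

-- ===== CLAIM (what is proved, stated in full; the proofs are below) =====
def Claim_equal_score_hibrido : Prop := ∀ (jogo : List Int), Dom_score_hibrido jogo → Spec_score_hibrido jogo (score_hibrido jogo)

-- ===== LEMMAS AND PROOFS =====

-- B's fused fold computes the four separate folds of A, from any start accumulators
theorem fused_fold_eq (jogo : List Int) : ∀ (p m q s : Int),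
    jogo.foldl (fun (st : Int × Int × Int × Int) d =>
      let (pares, moldura, primos, soma) := st
      let soma := soma + d
      let pares := if PySem.Int.mod d 2 = 0 then pares + 1 else pares
      let moldura := if PySem.Set.contains (PySem.Set.ofList ([1,2,3,4,5,6,10,15,20,21,22,23,24,25] : List Int)) d then moldura + 1 else moldura
      let primos := if PySem.Set.contains (PySem.Set.ofList ([2,3,5,7,11,13,17,19,23] : List Int)) d then primos + 1 else primos
      (pares, moldura, primos, soma)) (p, m, q, s)
    = (jogo.foldl (fun acc d => acc + (if PySem.Int.mod d 2 = 0 then 1 else 0)) p,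
       jogo.foldl (fun acc d => acc + (if ([1,2,3,4,5,6,10,15,20,21,22,23,24,25] : List Int).contains d then 1 else 0)) m,
       jogo.foldl (fun acc d => acc + (if ([2,3,5,7,11,13,17,19,23] : List Int).contains d then 1 else 0)) q,
       jogo.foldl (fun acc d => acc + d) s) := by
  induction jogo with
  | nil => intro p m q s; rfl
  | cons d rest ih =>
    intro p m q s
    simp only [List.foldl_cons]
    rw [ih]
    simp only [Prod.mk.injEq]
    refine ⟨?_, ?_, ?_, trivial⟩ <;>
      congr 1 <;> split_ifs <;> simp_all [PySem.Set.contains]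

-- ===== VERDICT (by name: the statement is the Claim_ definition above) =====
theorem score_hibrido_spec : Claim_equal_score_hibrido := by
  intro jogo _
  show score_hibrido jogo = score_hibrido_alt jogo
  simp only [score_hibrido, score_hibrido_alt]
  rw [fused_fold_eq]
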